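-- pv_equiv track=rewrite | github.com/platelminto/basketball-scheduler | scheduler/services/stats.py | compute_team_ref_counts
-- ===== SOURCE A (Python) =====
-- def compute_team_ref_counts(schedule, teams_per_level):
--     """
--     Compute how many times each team referees in each slot.
--
--     Args:
--         schedule: The formatted schedule data
--         teams_per_level: Dict mapping level to list of team names
--         levels: List of competition levels
--
--     Returns:
--         dict: Nested dict {level: {team_name: {slot: count}}}
--     """
--     # Determine max slot number from schedule
--     max_slot = 1
--     for week in schedule:
--         for slot_key in week["slots"].keys():
--             max_slot = max(max_slot, int(slot_key))
--
--     # Initialize counts with team names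
--     counts = {}
--     for level in teams_per_level:
--         counts[level] = {}
--         for team_name in teams_per_level.get(level, []):
--             counts[level][team_name] = {s: 0 for s in range(1, max_slot + 1)}
--
--     # Count referee assignments in each slot (only for teams in that level)
--     for week in schedule:
--         for slot_key, games in week["slots"].items():
--             slot = int(slot_key)
--             for game in games:
--                 level = game["level"]
--                 if level in teams_per_level and level in counts:
--                     ref_name = game.get("ref", "")
--                     # Only count if the referee is actually a team in this level
--                     if ref_name and ref_name in teams_per_level[level] and ref_name in counts[level]:
--                         counts[level][ref_name][slot] += 1
--
--     return counts
-- ===== SOURCE B (Python) =====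
-- def compute_team_ref_counts(schedule, teams_per_level):
--     # One scan over the schedule: collect (level, ref, slot) events and the max slot.
--     max_slot = 1
--     events = []
--     for week in schedule:
--         for slot_key, games in week["slots"].items():
--             slot = int(slot_key)
--             if slot > max_slot:
--                 max_slot = slot
--             for game in games:
--                 events.append((game["level"], game.get("ref", ""), slot))
--     # Sparse tally of refereed games.
--     tally = {}
--     for level, ref, slot in events:
--         if ref:
--             tally[(level, ref, slot)] = tally.get((level, ref, slot), 0) + 1
--     # Materialize the dense result.
--     return {level: {team: {s: tally.get((level, team, s), 0)
--                            for s in range(1, max_slot + 1)}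
--                     for team in teams}
--             for level, teams in teams_per_level.items()}
-- ===== Notes on version B (the rewrite author's own statement) =====
-- stated objective: alternative
-- what changed: Replaces A's dense init-then-increment over a nested dict (with per-game membership checks against teams_per_level and counts) by one flattening scan into an event list, a sparse tally keyed by (level, ref, slot), and a pure comprehension that materializes the dense result from the tally.
import Mathlib
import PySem

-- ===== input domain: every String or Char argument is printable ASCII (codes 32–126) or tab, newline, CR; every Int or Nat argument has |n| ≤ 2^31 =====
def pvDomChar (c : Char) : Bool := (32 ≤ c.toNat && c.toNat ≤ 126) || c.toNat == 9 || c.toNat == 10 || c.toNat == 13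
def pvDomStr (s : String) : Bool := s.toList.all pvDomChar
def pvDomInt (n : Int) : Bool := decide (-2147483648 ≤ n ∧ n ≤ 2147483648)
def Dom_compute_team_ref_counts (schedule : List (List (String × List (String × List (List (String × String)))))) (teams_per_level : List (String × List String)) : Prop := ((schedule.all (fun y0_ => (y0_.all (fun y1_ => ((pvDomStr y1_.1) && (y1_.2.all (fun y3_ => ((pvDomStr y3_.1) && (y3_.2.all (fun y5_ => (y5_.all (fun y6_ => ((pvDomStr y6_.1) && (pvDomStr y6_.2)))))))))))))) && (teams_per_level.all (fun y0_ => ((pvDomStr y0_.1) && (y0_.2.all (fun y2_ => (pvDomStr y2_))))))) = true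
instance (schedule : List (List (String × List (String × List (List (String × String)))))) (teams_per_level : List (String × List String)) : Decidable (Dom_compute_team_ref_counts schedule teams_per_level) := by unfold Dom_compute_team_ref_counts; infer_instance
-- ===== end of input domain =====

-- ===== PORT A =====
-- B replaces A's dense init-then-increment nested-dict counting by one flattening scan into
-- an event list, a sparse tally, and a pure materialization (objective: alternative).
-- Convention: Python dicts are association lists; lookups go through PySem.Dict.mk and the
-- nested result dict is returned as its items lists.

def pvA_max (schedule : List (List (String × List (String × List (List (String × String)))))) : Int :=
  schedule.foldl (fun m week =>
    (PySem.Dict.mk (((PySem.Dict.mk week).get? "slots").getD [])).keys.foldl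
      (fun m slot_key => max m ((PySem.Int.ofStr? slot_key).getD 0)) m) 1

def pvA_init (teams_per_level : List (String × List String)) (max_slot : Int) :
    PySem.Dict String (PySem.Dict String (PySem.Dict Int Int)) :=
  teams_per_level.foldl (fun counts p =>
    let counts := counts.insert p.1 PySem.Dict.empty
    (((PySem.Dict.mk teams_per_level).get? p.1).getD []).foldl (fun counts team_name =>
      counts.modify p.1 PySem.Dict.empty (fun d =>
        d.insert team_name ((PySem.List.pyRange 1 (max_slot + 1)).foldl
          (fun dd s => dd.insert s 0) PySem.Dict.empty))) counts) PySem.Dict.empty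

def pvA_count (schedule : List (List (String × List (String × List (List (String × String))))))
    (teams_per_level : List (String × List String))
    (counts0 : PySem.Dict String (PySem.Dict String (PySem.Dict Int Int))) :
    PySem.Dict String (PySem.Dict String (PySem.Dict Int Int)) :=
  schedule.foldl (fun counts week =>
    (((PySem.Dict.mk week).get? "slots").getD []).foldl (fun counts kv =>
      let slot := (PySem.Int.ofStr? kv.1).getD 0
      kv.2.foldl (fun counts game =>
        let level := ((PySem.Dict.mk game).get? "level").getD ""
        if (PySem.Dict.mk teams_per_level).contains level ∧ counts.contains level then
          let ref_name := (PySem.Dict.mk game).getD "ref" ""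
          if ref_name ≠ "" ∧ ref_name ∈ ((PySem.Dict.mk teams_per_level).get? level).getD [] ∧
              ((counts.get? level).getD PySem.Dict.empty).contains ref_name then
            counts.modify level PySem.Dict.empty (fun d =>
              d.modify ref_name PySem.Dict.empty (fun dd => dd.modify slot 0 (· + 1)))
          else counts
        else counts) counts) counts) counts0

def compute_team_ref_counts (schedule : List (List (String × List (String × List (List (String × String)))))) (teams_per_level : List (String × List String)) : List (String × List (String × List (Int × Int))) :=
  let max_slot := pvA_max schedule
  let counts := pvA_count schedule teams_per_level (pvA_init teams_per_level max_slot)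
  counts.items.map (fun p => (p.1, p.2.items.map (fun q => (q.1, q.2.items))))

-- ===== PORT B =====

def pvB_scan (schedule : List (List (String × List (String × List (List (String × String)))))) :
    Int × List (String × String × Int) :=
  schedule.foldl (fun st week =>
    (((PySem.Dict.mk week).get? "slots").getD []).foldl (fun st kv =>
      let slot := (PySem.Int.ofStr? kv.1).getD 0
      let st := if st.1 < slot then (slot, st.2) else st
      kv.2.foldl (fun st game =>
        (st.1, st.2 ++ [(((PySem.Dict.mk game).get? "level").getD "",
                          (PySem.Dict.mk game).getD "ref" "", slot)])) st) st) (1, [])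

def pvB_tally (events : List (String × String × Int)) : PySem.Dict (String × String × Int) Int :=
  events.foldl (fun t e => if e.2.1 ≠ "" then t.insert e (t.getD e 0 + 1) else t) PySem.Dict.empty

def compute_team_ref_counts_alt (schedule : List (List (String × List (String × List (List (String × String)))))) (teams_per_level : List (String × List String)) : List (String × List (String × List (Int × Int))) :=
  let st := pvB_scan schedule
  let tally := pvB_tally st.2
  (teams_per_level.foldl (fun r p =>
    r.insert p.1 ((p.2.foldl (fun d team =>
      d.insert team (((PySem.List.pyRange 1 (st.1 + 1)).foldl (fun dd s =>
        dd.insert s (tally.getD (p.1, team, s) 0)) PySem.Dict.empty).items))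
      (PySem.Dict.empty : PySem.Dict String (List (Int × Int)))).items))
    (PySem.Dict.empty : PySem.Dict String (List (String × List (Int × Int))))).items

-- ===== PRECONDITION & SPEC =====
-- Pre_ excludes inputs on which A raises (a week without a "slots" key, a slot key that is not an
-- int literal, a game without a "level" key: KeyError/ValueError), slot keys parsing below 1 (A
-- raises KeyError whenever such a slot holds a counted referee, and returns only accidentally
-- otherwise), and association lists with duplicate keys, which do not correspond to Python dicts.
def Pre_compute_team_ref_counts (schedule : List (List (String × List (String × List (List (String × String)))))) (teams_per_level : List (String × List String)) : Prop :=
  (teams_per_level.map Prod.fst).Nodup ∧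
  ∀ week ∈ schedule,
    (week.map Prod.fst).Nodup ∧
    ((PySem.Dict.mk week).get? "slots").isSome = true ∧
    ((((PySem.Dict.mk week).get? "slots").getD []).map Prod.fst).Nodup ∧
    ∀ kv ∈ ((PySem.Dict.mk week).get? "slots").getD [],
      1 ≤ (PySem.Int.ofStr? kv.1).getD 0 ∧
      ∀ game ∈ kv.2, (game.map Prod.fst).Nodup ∧ ((PySem.Dict.mk game).get? "level").isSome = true
instance (schedule : List (List (String × List (String × List (List (String × String)))))) (teams_per_level : List (String × List String)) : Decidable (Pre_compute_team_ref_counts schedule teams_per_level) := by unfold Pre_compute_team_ref_counts; infer_instance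

def pvWitness_compute_team_ref_counts : (List (List (String × List (String × List (List (String × String)))))) × (List (String × List String)) :=
  ([[("slots", [("1", [[("level", "L"), ("ref", "t1")]]), ("2", [])])]], [("L", ["t1", "t2"])])

def Spec_compute_team_ref_counts (schedule : List (List (String × List (String × List (List (String × String)))))) (teams_per_level : List (String × List String)) (out : List (String × List (String × List (Int × Int)))) : Prop := out = compute_team_ref_counts_alt schedule teams_per_level
instance (schedule : List (List (String × List (String × List (List (String × String)))))) (teams_per_level : List (String × List String)) (out : List (String × List (String × List (Int × Int)))) : Decidable (Spec_compute_team_ref_counts schedule teams_per_level out) := by unfold Spec_compute_team_ref_counts; infer_instance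

-- ===== CLAIM (what is proved, stated in full; the proofs are below) =====
def Claim_equal_compute_team_ref_counts : Prop := ∀ (schedule : List (List (String × List (String × List (List (String × String)))))) (teams_per_level : List (String × List String)), Dom_compute_team_ref_counts schedule teams_per_level → Pre_compute_team_ref_counts schedule teams_per_level → Spec_compute_team_ref_counts schedule teams_per_level (compute_team_ref_counts schedule teams_per_level)

-- ===== LEMMAS AND PROOFS =====

def pvSlotsOf (week : List (String × List (String × List (List (String × String))))) :
    List (String × List (List (String × String))) :=
  ((PySem.Dict.mk week).get? "slots").getD []

def pvTriple (k : String) (g : List (String × String)) : String × String × Int :=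
  (((PySem.Dict.mk g).get? "level").getD "", (PySem.Dict.mk g).getD "ref" "",
    (PySem.Int.ofStr? k).getD 0)

def pvEv (schedule : List (List (String × List (String × List (List (String × String)))))) :
    List (String × String × Int) :=
  schedule.flatMap (fun w => (pvSlotsOf w).flatMap (fun kv => kv.2.map (pvTriple kv.1)))

def pvAllSlots (schedule : List (List (String × List (String × List (List (String × String)))))) : List Int :=
  schedule.flatMap (fun w => (pvSlotsOf w).map (fun kv => (PySem.Int.ofStr? kv.1).getD 0))

def pvMax (schedule : List (List (String × List (String × List (List (String × String)))))) : Int :=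
  (pvAllSlots schedule).foldl max 1

def pvCnt (evs : List (String × String × Int)) (lv t : String) (s : Int) : Int :=
  ((evs.filter (fun e => decide (e.2.1 ≠ ""))).count (lv, t, s) : Int)

lemma pv_max_nested (schedule : List (List (String × List (String × List (List (String × String)))))) :
    pvMax schedule = schedule.foldl (fun m w => (pvSlotsOf w).foldl
      (fun m kv => max m ((PySem.Int.ofStr? kv.1).getD 0)) m) 1 := by
  unfold pvMax pvAllSlots
  rw [List.flatMap_def, List.foldl_flatten]
  simp [List.foldl_map]

lemma pv_tally_getD (evs : List (String × String × Int)) (key : String × String × Int) :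
    (pvB_tally evs).getD key 0 = pvCnt evs key.1 key.2.1 key.2.2 := by
  unfold pvB_tally pvCnt
  rw [PySem.List.foldl_ite_eq_foldl_filter (p := fun e : String × String × Int => e.2.1 ≠ "")
    (f := fun (t : PySem.Dict (String × String × Int) Int) e => t.insert e (t.getD e 0 + 1))]
  rw [PySem.Dict.getD_foldl_insert_add_one]
  simp [PySem.Dict.getD_empty]

lemma pv_A_max_eq (schedule : List (List (String × List (String × List (List (String × String)))))) :
    pvA_max schedule = pvMax schedule := by
  rw [pv_max_nested]
  unfold pvA_max pvSlotsOf
  simp [PySem.Dict.keys, List.foldl_map]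

def pvStepA (tpl : List (String × List String))
    (counts : PySem.Dict String (PySem.Dict String (PySem.Dict Int Int)))
    (e : String × String × Int) : PySem.Dict String (PySem.Dict String (PySem.Dict Int Int)) :=
  if (PySem.Dict.mk tpl).contains e.1 ∧ counts.contains e.1 then
    if e.2.1 ≠ "" ∧ e.2.1 ∈ ((PySem.Dict.mk tpl).get? e.1).getD [] ∧
        ((counts.get? e.1).getD PySem.Dict.empty).contains e.2.1 then
      counts.modify e.1 PySem.Dict.empty (fun d =>
        d.modify e.2.1 PySem.Dict.empty (fun dd => dd.modify e.2.2 0 (· + 1)))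
    else counts
  else counts

lemma pv_A_count_eq (schedule : List (List (String × List (String × List (List (String × String))))))
    (tpl : List (String × List String))
    (c0 : PySem.Dict String (PySem.Dict String (PySem.Dict Int Int))) :
    pvA_count schedule tpl c0 = (pvEv schedule).foldl (pvStepA tpl) c0 := by
  unfold pvA_count pvEv pvSlotsOf
  rw [List.flatMap_def, List.foldl_flatten, List.foldl_map]
  apply PySem.List.foldl_congr_mem
  intro acc w _
  rw [List.flatMap_def, List.foldl_flatten, List.foldl_map]
  apply PySem.List.foldl_congr_mem
  intro acc kv _
  rw [List.foldl_map]
  apply PySem.List.foldl_congr_mem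
  intro acc game _
  simp only [pvStepA, pvTriple]

lemma pv_scan_games (k : String) (games : List (List (String × String))) (m : Int)
    (ev : List (String × String × Int)) :
    games.foldl (fun st game =>
        (st.1, st.2 ++ [(((PySem.Dict.mk game).get? "level").getD "",
          (PySem.Dict.mk game).getD "ref" "", (PySem.Int.ofStr? k).getD 0)])) (m, ev) =
      (m, ev ++ games.map (pvTriple k)) := by
  rw [PySem.List.foldl_prod_mk (f := fun (m : Int) _ => m)
    (g := fun ev game => ev ++ [(((PySem.Dict.mk game).get? "level").getD "",
      (PySem.Dict.mk game).getD "ref" "", (PySem.Int.ofStr? k).getD 0)])]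
  rw [PySem.List.foldl_ignore]
  rw [PySem.List.foldl_append_singleton_eq_map]
  simp [pvTriple]

lemma pv_scan_slots (slots : List (String × List (List (String × String)))) (m : Int)
    (ev : List (String × String × Int)) :
    slots.foldl (fun st kv =>
      let slot := (PySem.Int.ofStr? kv.1).getD 0
      let st := if st.1 < slot then (slot, st.2) else st
      kv.2.foldl (fun st game =>
        (st.1, st.2 ++ [(((PySem.Dict.mk game).get? "level").getD "",
          (PySem.Dict.mk game).getD "ref" "", slot)])) st) (m, ev) =
      (slots.foldl (fun m kv => max m ((PySem.Int.ofStr? kv.1).getD 0)) m,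
        ev ++ slots.flatMap (fun kv => kv.2.map (pvTriple kv.1))) := by
  induction slots generalizing m ev with
  | nil => simp
  | cons kv rest ih =>
    simp only [List.foldl_cons]
    have hif : (if (m, ev).1 < (PySem.Int.ofStr? kv.1).getD 0
        then ((PySem.Int.ofStr? kv.1).getD 0, (m, ev).2) else (m, ev)) =
        ((max m ((PySem.Int.ofStr? kv.1).getD 0)), ev) := by
      split_ifs with h
      · rw [max_eq_right (le_of_lt h)]
      · rw [max_eq_left (not_lt.1 h)]
    rw [hif, pv_scan_games, ih]
    simp

lemma pv_B_scan_eq (schedule : List (List (String × List (String × List (List (String × String)))))) :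
    pvB_scan schedule = (pvMax schedule, pvEv schedule) := by
  rw [pv_max_nested]
  unfold pvB_scan pvEv
  have : ∀ (sch : List (List (String × List (String × List (List (String × String)))))) (m : Int)
      (ev : List (String × String × Int)),
      sch.foldl (fun st week =>
        (((PySem.Dict.mk week).get? "slots").getD []).foldl (fun st kv =>
          let slot := (PySem.Int.ofStr? kv.1).getD 0
          let st := if st.1 < slot then (slot, st.2) else st
          kv.2.foldl (fun st game =>
            (st.1, st.2 ++ [(((PySem.Dict.mk game).get? "level").getD "",
              (PySem.Dict.mk game).getD "ref" "", slot)])) st) st) (m, ev) =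
        (sch.foldl (fun m w => (pvSlotsOf w).foldl
            (fun m kv => max m ((PySem.Int.ofStr? kv.1).getD 0)) m) m,
          ev ++ sch.flatMap (fun w => (pvSlotsOf w).flatMap (fun kv => kv.2.map (pvTriple kv.1)))) := by
    intro sch
    induction sch with
    | nil => simp
    | cons w rest ih =>
      intro m ev
      simp only [List.foldl_cons]
      rw [pv_scan_slots]
      rw [ih]
      simp [pvSlotsOf]
  rw [this]
  simp

lemma pv_insert_mk_map {α K ν : Type} [BEq K] [LawfulBEq K] [DecidableEq K] (l : List α) (k : α → K) (v : α → ν)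
    (k0 : K) (w : ν) (hmem : k0 ∈ l.map k) :
    (PySem.Dict.mk (l.map (fun x => (k x, v x)))).insert k0 w =
      PySem.Dict.mk (l.map (fun x => (k x, if k x = k0 then w else v x))) := by
  obtain ⟨x0, hx0, hk0⟩ := List.mem_map.1 hmem
  have hc : (PySem.Dict.mk (l.map (fun x => (k x, v x)))).contains k0 = true := by
    simp [PySem.Dict.contains, List.any_eq_true]
    exact ⟨x0, hx0, hk0⟩
  apply PySem.Dict.ext
  rw [PySem.Dict.items_insert_of_contains _ _ hc]
  simp only [List.map_map]
  apply List.map_congr_left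
  intro a _
  by_cases h : k a = k0 <;> simp [h]

lemma pv_get?_mk_map {α K ν : Type} [BEq K] [LawfulBEq K] (l : List α) (k : α → K) (v : α → ν)
    (x0 : α) (hx : x0 ∈ l) (hnd : (l.map k).Nodup) :
    (PySem.Dict.mk (l.map (fun x => (k x, v x)))).get? (k x0) = some (v x0) := by
  apply PySem.Dict.get?_of_mem_items
  · exact List.mem_map.2 ⟨x0, hx, rfl⟩
  · simpa [PySem.Dict.keys, List.map_map] using hnd

lemma pv_contains_mk_map {α K ν : Type} [BEq K] [LawfulBEq K] [DecidableEq K] (l : List α) (k : α → K)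
    (v : α → ν) (k0 : K) :
    (PySem.Dict.mk (l.map (fun x => (k x, v x)))).contains k0 = decide (k0 ∈ l.map k) := by
  rw [PySem.Dict.contains_eq_decide_mem_keys]
  simp [PySem.Dict.keys, List.map_map]

lemma pv_entry_unique {K V : Type} (l : List (K × V)) (hnd : (l.map Prod.fst).Nodup)
    {p q : K × V} (hp : p ∈ l) (hq : q ∈ l) (h : p.1 = q.1) : p = q := by
  have := List.inj_on_of_nodup_map hnd hp hq h
  exact this

lemma pv_modify_mk_map {α K ν : Type} [BEq K] [LawfulBEq K] [DecidableEq K] (l : List α) (k : α → K) (v : α → ν)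
    (x0 : α) (d0 : ν) (h : ν → ν) (hx : x0 ∈ l) (hnd : (l.map k).Nodup) :
    (PySem.Dict.mk (l.map (fun x => (k x, v x)))).modify (k x0) d0 h =
      PySem.Dict.mk (l.map (fun x => (k x, if k x = k x0 then h (v x0) else v x))) := by
  have hg : (PySem.Dict.mk (l.map (fun x => (k x, v x)))).getD (k x0) d0 = v x0 := by
    simp [PySem.Dict.getD, pv_get?_mk_map l k v x0 hx hnd]
  rw [PySem.Dict.modify, hg]
  exact pv_insert_mk_map l k v (k x0) (h (v x0)) (List.mem_map.2 ⟨x0, hx, rfl⟩)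

lemma pv_insert_modify {K ν : Type} [BEq K] [LawfulBEq K] (d : PySem.Dict K ν) (k : K)
    (v : ν) (d0 : ν) (h : ν → ν) :
    (d.insert k v).modify k d0 h = d.insert k (h v) := by
  rw [PySem.Dict.modify]
  rw [PySem.Dict.getD_insert_self]
  rw [PySem.Dict.insert_insert_self]

lemma pv_foldl_insert_set {ν : Type} (teams : List String) (g : String → ν) :
    (teams.foldl (fun d t => d.insert t (g t)) (PySem.Dict.empty : PySem.Dict String ν)).items =
      (PySem.Set.ofList teams).map (fun t => (t, g t)) := by
  induction teams using List.reverseRecOn with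
  | nil => simp [PySem.Set.ofList, PySem.Dict.empty]
  | append_singleton ts u ih =>
    rw [List.foldl_append]
    have hd : (ts.foldl (fun d t => d.insert t (g t)) (PySem.Dict.empty : PySem.Dict String ν)) =
        PySem.Dict.mk ((PySem.Set.ofList ts).map (fun t => (t, g t))) := PySem.Dict.ext ih
    rw [hd]
    simp only [List.foldl_cons, List.foldl_nil]
    have hset : PySem.Set.ofList (ts ++ [u]) = PySem.Set.add (PySem.Set.ofList ts) u := by
      rw [PySem.Set.ofList_eq_foldl, PySem.Set.ofList_eq_foldl, List.foldl_append]
      rfl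
    by_cases hu : u ∈ ts
    · have hc : (PySem.Dict.mk ((PySem.Set.ofList ts).map (fun t => (t, g t)))).contains u = true := by
        rw [pv_contains_mk_map]
        simp [PySem.Set.mem_ofList, hu]
      have hadd : PySem.Set.add (PySem.Set.ofList ts) u = PySem.Set.ofList ts := by
        simp [PySem.Set.add, PySem.Set.contains, PySem.Set.mem_ofList, hu]
      rw [hset, hadd]
      have hmk := pv_insert_mk_map (PySem.Set.ofList ts) (fun t => t) (fun t => g t) u (g u)
        (by simpa [PySem.Set.mem_ofList] using hu)
      simp only at hmk
      rw [hmk]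
      exact List.map_congr_left (fun a _ => by by_cases h : a = u <;> simp [h])
    · have hc : (PySem.Dict.mk ((PySem.Set.ofList ts).map (fun t => (t, g t)))).contains u = false := by
        rw [pv_contains_mk_map]
        simp [PySem.Set.mem_ofList, hu]
      rw [PySem.Dict.items_insert_of_not_contains _ _ hc]
      have hadd : PySem.Set.add (PySem.Set.ofList ts) u = PySem.Set.ofList ts ++ [u] := by
        simp [PySem.Set.add, PySem.Set.contains, PySem.Set.mem_ofList, hu]
      rw [hset, hadd]
      simp

def pvRowD (mx : Int) (f : Int → Int) : PySem.Dict Int Int :=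
  PySem.Dict.mk ((PySem.List.pyRange 1 (mx + 1)).map (fun s => (s, f s)))

def pvMidD (teams : List String) (g : String → PySem.Dict Int Int) :
    PySem.Dict String (PySem.Dict Int Int) :=
  PySem.Dict.mk ((PySem.Set.ofList teams).map (fun t => (t, g t)))

def pvMat (tpl : List (String × List String)) (mx : Int) (F : String → String → Int → Int) :
    PySem.Dict String (PySem.Dict String (PySem.Dict Int Int)) :=
  PySem.Dict.mk (tpl.map (fun p => (p.1, pvMidD p.2 (fun t => pvRowD mx (F p.1 t)))))

lemma pv_mat_congr (tpl : List (String × List String)) (mx : Int)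
    (F G : String → String → Int → Int)
    (h : ∀ p ∈ tpl, ∀ t ∈ PySem.Set.ofList p.2, ∀ s ∈ PySem.List.pyRange 1 (mx + 1),
      F p.1 t s = G p.1 t s) :
    pvMat tpl mx F = pvMat tpl mx G := by
  unfold pvMat pvMidD pvRowD
  apply PySem.Dict.ext
  simp only []
  apply List.map_congr_left
  intro p hp
  simp only [Prod.mk.injEq, true_and]
  apply PySem.Dict.ext
  apply List.map_congr_left
  intro t ht
  simp only [Prod.mk.injEq, true_and]
  apply PySem.Dict.ext
  apply List.map_congr_left
  intro s hs
  simp only [Prod.mk.injEq, true_and]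
  exact h p hp t ht s hs

lemma pv_mat_items (tpl : List (String × List String)) (mx : Int) (F : String → String → Int → Int) :
    (pvMat tpl mx F).items =
      tpl.map (fun p => (p.1, pvMidD p.2 (fun t => pvRowD mx (F p.1 t)))) := rfl

lemma pv_modify_mk_map2 {α K ν : Type} [BEq K] [LawfulBEq K] [DecidableEq K] (l : List α)
    (k : α → K) (v : α → ν) (k0 : K) (d0 : ν) (h : ν → ν)
    (hk0 : k0 ∈ l.map k) (hnd : (l.map k).Nodup) :
    (PySem.Dict.mk (l.map (fun x => (k x, v x)))).modify k0 d0 h =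
      PySem.Dict.mk (l.map (fun x => (k x, if k x = k0 then h (v x) else v x))) := by
  obtain ⟨x0, hx0, hkx0⟩ := List.mem_map.1 hk0
  rw [← hkx0]
  rw [pv_modify_mk_map l k v x0 d0 h hx0 hnd]
  apply PySem.Dict.ext
  apply List.map_congr_left
  intro a ha
  by_cases hak : k a = k x0
  · have : a = x0 := List.inj_on_of_nodup_map hnd ha hx0 hak
    subst this
    simp
  · simp [hak]

lemma pv_mid_congr (teams : List String) (g1 g2 : String → PySem.Dict Int Int)
    (h : ∀ t ∈ teams, g1 t = g2 t) : pvMidD teams g1 = pvMidD teams g2 := by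
  unfold pvMidD
  apply PySem.Dict.ext
  apply List.map_congr_left
  intro t ht
  rw [h t ((PySem.Set.mem_ofList teams t).1 ht)]

lemma pv_row_congr (mx : Int) (f1 f2 : Int → Int)
    (h : ∀ s, 1 ≤ s → s ≤ mx → f1 s = f2 s) : pvRowD mx f1 = pvRowD mx f2 := by
  unfold pvRowD
  apply PySem.Dict.ext
  apply List.map_congr_left
  intro s hs
  obtain ⟨hs1, hs2⟩ := PySem.List.mem_pyRange_one.1 hs
  rw [h s hs1 (by omega)]

lemma pv_row_modify (mx : Int) (f : Int → Int) (s0 : Int) (hh : Int → Int)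
    (hs1 : 1 ≤ s0) (hs2 : s0 ≤ mx) :
    (pvRowD mx f).modify s0 0 hh = pvRowD mx (fun s => if s = s0 then hh (f s) else f s) := by
  unfold pvRowD
  have := pv_modify_mk_map2 (PySem.List.pyRange 1 (mx + 1)) (fun s => s) (fun s => f s) s0 0 hh
    (by simpa using (PySem.List.mem_pyRange_one (a := 1) (b := mx + 1) (x := s0)).2 ⟨hs1, by omega⟩)
    (by simpa using PySem.List.nodup_pyRange_one 1 (mx + 1))
  simpa using this

lemma pv_mid_modify (teams : List String) (g : String → PySem.Dict Int Int) (ref0 : String)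
    (hh : PySem.Dict Int Int → PySem.Dict Int Int) (hr : ref0 ∈ teams) :
    (pvMidD teams g).modify ref0 PySem.Dict.empty hh =
      pvMidD teams (fun t => if t = ref0 then hh (g t) else g t) := by
  unfold pvMidD
  have := pv_modify_mk_map2 (PySem.Set.ofList teams) (fun t => t) (fun t => g t) ref0
    PySem.Dict.empty hh (by simp [PySem.Set.mem_ofList, hr])
    (by simpa using PySem.Set.nodup_ofList teams)
  simpa using this

lemma pv_mat_modify (tpl : List (String × List String)) (mx : Int)
    (F : String → String → Int → Int) (lv0 : String)
    (hh : PySem.Dict String (PySem.Dict Int Int) → PySem.Dict String (PySem.Dict Int Int))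
    (hnd : (tpl.map Prod.fst).Nodup) (hlv : lv0 ∈ tpl.map Prod.fst) :
    (pvMat tpl mx F).modify lv0 PySem.Dict.empty hh =
      PySem.Dict.mk (tpl.map (fun p => (p.1,
        if p.1 = lv0 then hh (pvMidD p.2 (fun t => pvRowD mx (F p.1 t)))
        else pvMidD p.2 (fun t => pvRowD mx (F p.1 t))))) := by
  unfold pvMat
  have := pv_modify_mk_map2 tpl (fun p => p.1)
    (fun p => pvMidD p.2 (fun t => pvRowD mx (F p.1 t))) lv0 PySem.Dict.empty hh
    (by simpa using hlv) (by simpa using hnd)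
  simpa using this

lemma pv_stepA_mat (tpl : List (String × List String)) (mx : Int) (F : String → String → Int → Int)
    (hnd : (tpl.map Prod.fst).Nodup) (e : String × String × Int)
    (h1 : 1 ≤ e.2.2) (h2 : e.2.2 ≤ mx) :
    pvStepA tpl (pvMat tpl mx F) e =
      pvMat tpl mx (fun lv t s => F lv t s + (if e.2.1 ≠ "" ∧ (lv, t, s) = e then 1 else 0)) := by
  obtain ⟨lv0, ref0, s0⟩ := e
  simp only at h1 h2
  unfold pvStepA
  simp only
  by_cases hlv : lv0 ∈ tpl.map Prod.fst
  · obtain ⟨p0, hp0, hp0fst⟩ := List.mem_map.1 hlv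
    have htplget : (PySem.Dict.mk tpl).get? lv0 = some p0.2 := by
      apply PySem.Dict.get?_of_mem_items
      · show (lv0, p0.2) ∈ tpl
        rw [← hp0fst]
        exact hp0
      · simpa [PySem.Dict.keys] using hnd
    have hmatget : (pvMat tpl mx F).get? lv0 = some (pvMidD p0.2 (fun t => pvRowD mx (F p0.1 t))) := by
      rw [← hp0fst]
      exact pv_get?_mk_map tpl (fun p => p.1)
        (fun p => pvMidD p.2 (fun t => pvRowD mx (F p.1 t))) p0 hp0 (by simpa using hnd)
    have hc1 : ((PySem.Dict.mk tpl).contains lv0 ∧ (pvMat tpl mx F).contains lv0) := by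
      constructor
      · rw [PySem.Dict.contains_eq_isSome_get?, htplget]; rfl
      · rw [PySem.Dict.contains_eq_isSome_get?, hmatget]; rfl
    rw [if_pos hc1]
    have hmidcont : ∀ r : String,
        ((pvMidD p0.2 (fun t => pvRowD mx (F p0.1 t))).contains r) = decide (r ∈ p0.2) := by
      intro r
      unfold pvMidD
      rw [pv_contains_mk_map (PySem.Set.ofList p0.2) (fun t => t) (fun t => pvRowD mx (F p0.1 t)) r]
      simp [PySem.Set.mem_ofList]
    by_cases hcond : ref0 ≠ "" ∧ ref0 ∈ p0.2
    · have hok : (ref0 ≠ "" ∧ ref0 ∈ ((PySem.Dict.mk tpl).get? lv0).getD [] ∧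
          (((pvMat tpl mx F).get? lv0).getD PySem.Dict.empty).contains ref0) := by
        refine ⟨hcond.1, ?_, ?_⟩
        · rw [htplget]; exact hcond.2
        · rw [hmatget]
          simpa [hmidcont ref0] using hcond.2
      rw [if_pos hok]
      rw [pv_mat_modify tpl mx F lv0 _ hnd hlv]
      unfold pvMat
      apply PySem.Dict.ext
      apply List.map_congr_left
      intro p hp
      simp only [Prod.mk.injEq, true_and]
      by_cases hpk : p.1 = lv0
      · have hpp0 : p = p0 := pv_entry_unique tpl hnd hp hp0 (by rw [hpk, hp0fst])
        rw [if_pos hpk]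
        rw [pv_mid_modify p.2 _ ref0 _ (by rw [hpp0]; exact hcond.2)]
        apply pv_mid_congr
        intro t ht
        by_cases htr : t = ref0
        · rw [if_pos htr]
          rw [pv_row_modify mx _ s0 _ h1 h2]
          apply pv_row_congr
          intro s hsl hsu
          by_cases hss : s = s0
          · rw [if_pos hss, if_pos ⟨hcond.1, hpk, htr, hss⟩]
          · rw [if_neg hss, if_neg, add_zero]
            rintro ⟨-, -, -, hh⟩
            exact hss hh
        · rw [if_neg htr]
          apply pv_row_congr
          intro s hsl hsu
          rw [if_neg, add_zero]
          rintro ⟨-, -, hh, -⟩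
          exact htr hh
      · rw [if_neg hpk]
        apply pv_mid_congr
        intro t ht
        apply pv_row_congr
        intro s hsl hsu
        rw [if_neg, add_zero]
        rintro ⟨-, hh, -, -⟩
        exact hpk hh
    · have hbad : ¬ (ref0 ≠ "" ∧ ref0 ∈ ((PySem.Dict.mk tpl).get? lv0).getD [] ∧
          (((pvMat tpl mx F).get? lv0).getD PySem.Dict.empty).contains ref0) := by
        rw [htplget, hmatget]
        intro hx
        exact hcond ⟨hx.1, by simpa using hx.2.1⟩
      rw [if_neg hbad]
      apply pv_mat_congr
      intro p hp t ht s hs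
      rw [if_neg, add_zero]
      rintro ⟨hr, hh⟩
      simp only [Prod.mk.injEq] at hh
      have hpp0 : p = p0 := pv_entry_unique tpl hnd hp hp0 (by rw [hh.1, hp0fst])
      apply hcond
      refine ⟨hr, ?_⟩
      rw [← hh.2.1]
      rw [hpp0] at ht
      exact (PySem.Set.mem_ofList p0.2 t).1 ht
  · have hc1 : ¬ ((PySem.Dict.mk tpl).contains lv0 ∧ (pvMat tpl mx F).contains lv0) := by
      intro hx
      have := hx.1
      rw [PySem.Dict.contains_eq_decide_mem_keys] at this
      simp only [PySem.Dict.keys] at this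
      exact hlv (by simpa using this)
    rw [if_neg hc1]
    apply pv_mat_congr
    intro p hp t ht s hs
    rw [if_neg, add_zero]
    rintro ⟨hr, hh⟩
    simp only [Prod.mk.injEq] at hh
    exact hlv (hh.1 ▸ List.mem_map.2 ⟨p, hp, rfl⟩)

lemma pv_count_fold_mat (tpl : List (String × List String)) (mx : Int)
    (hnd : (tpl.map Prod.fst).Nodup) (evs : List (String × String × Int))
    (hs : ∀ e ∈ evs, 1 ≤ e.2.2 ∧ e.2.2 ≤ mx) (F : String → String → Int → Int) :
    evs.foldl (pvStepA tpl) (pvMat tpl mx F) =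
      pvMat tpl mx (fun lv t s => F lv t s + pvCnt evs lv t s) := by
  induction evs generalizing F with
  | nil =>
    have : (fun lv t s => F lv t s + pvCnt [] lv t s) = F := by
      funext lv t s
      simp [pvCnt]
    rw [List.foldl_nil, this]
  | cons e rest ih =>
    rw [List.foldl_cons]
    rw [pv_stepA_mat tpl mx F hnd e (hs e (List.mem_cons_self)).1 (hs e (List.mem_cons_self)).2]
    rw [ih (fun e' he' => hs e' (List.mem_cons_of_mem e he'))]
    have : (fun lv t s => (F lv t s + if e.2.1 ≠ "" ∧ (lv, t, s) = e then 1 else 0) + pvCnt rest lv t s)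
        = (fun lv t s => F lv t s + pvCnt (e :: rest) lv t s) := by
      funext lv t s
      unfold pvCnt
      by_cases hr : e.2.1 ≠ ""
      · rw [List.filter_cons_of_pos (by simpa using hr)]
        rw [List.count_cons]
        by_cases hh : (lv, t, s) = e
        · rw [if_pos ⟨hr, hh⟩]
          have : (e == (lv, t, s)) = true := by
            simp [← hh]
          rw [this]
          simp only [if_true]
          push_cast
          ring
        · rw [if_neg (by rintro ⟨-, hc⟩; exact hh hc)]
          have : (e == (lv, t, s)) = false := by
            simp
            intro hc
            exact hh (by rw [hc])
          rw [this]
          simp only [Bool.false_eq_true, if_false]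
          push_cast
          ring
      · rw [List.filter_cons_of_neg (by simpa using hr)]
        rw [if_neg (by rintro ⟨hc, -⟩; exact hr hc)]
        ring_nf
    rw [this]

lemma pv_collapse (teams : List String) (k : String)
    (g : String → PySem.Dict Int Int)
    (c : PySem.Dict String (PySem.Dict String (PySem.Dict Int Int)))
    (v0 : PySem.Dict String (PySem.Dict Int Int)) :
    teams.foldl (fun c t => c.modify k PySem.Dict.empty (fun d => d.insert t (g t)))
        (c.insert k v0) =
      c.insert k (teams.foldl (fun d t => d.insert t (g t)) v0) := by
  induction teams generalizing v0 with
  | nil => rfl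
  | cons t ts ih =>
    rw [List.foldl_cons, pv_insert_modify, ih]
    rfl

lemma pv_A_init_eq (tpl : List (String × List String)) (mx : Int)
    (hnd : (tpl.map Prod.fst).Nodup) :
    pvA_init tpl mx = pvMat tpl mx (fun _ _ _ => 0) := by
  unfold pvA_init
  rw [PySem.List.foldl_congr_mem tpl _ (fun c (p : String × List String) =>
    c.insert p.1 (p.2.foldl (fun d t => d.insert t
      ((PySem.List.pyRange 1 (mx + 1)).foldl (fun dd s => dd.insert s 0) PySem.Dict.empty))
      PySem.Dict.empty)) _ ?_]
  · apply PySem.Dict.ext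
    have hfresh := PySem.Dict.items_foldl_insert_fresh (l := tpl) (k := fun p => p.1)
      (v := fun p : String × List String =>
        List.foldl (fun (d : PySem.Dict String (PySem.Dict Int Int)) t => d.insert t
          (List.foldl (fun (dd : PySem.Dict Int Int) s => dd.insert s (0 : Int))
            PySem.Dict.empty (PySem.List.pyRange 1 (mx + 1)))) PySem.Dict.empty p.2)
      (d := PySem.Dict.empty) (fun _ _ => rfl) (by simpa using hnd)
    rw [hfresh]
    rw [pv_mat_items]
    rw [show (PySem.Dict.empty : PySem.Dict String (PySem.Dict String (PySem.Dict Int Int))).items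
      = [] from rfl, List.nil_append]
    apply List.map_congr_left
    intro p hp
    simp only [Prod.mk.injEq, true_and]
    have hrow : ((PySem.List.pyRange 1 (mx + 1)).foldl (fun dd s => dd.insert s 0)
        (PySem.Dict.empty : PySem.Dict Int Int)) = pvRowD mx (fun _ => 0) := by
      apply PySem.Dict.ext
      rw [PySem.Dict.items_foldl_insert_fresh (PySem.List.pyRange 1 (mx + 1)) (fun s => s)
        (fun _ => 0) PySem.Dict.empty (fun _ _ => rfl)
        (by simpa using PySem.List.nodup_pyRange_one 1 (mx + 1))]
      simp [pvRowD, PySem.Dict.empty]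
    apply PySem.Dict.ext
    have hmidset := pv_foldl_insert_set (ν := PySem.Dict Int Int) p.2
      (fun _ => List.foldl (fun (dd : PySem.Dict Int Int) s => dd.insert s (0 : Int))
        PySem.Dict.empty (PySem.List.pyRange 1 (mx + 1)))
    rw [hmidset]
    show _ = (pvMidD p.2 (fun t => pvRowD mx (fun _ => 0))).items
    unfold pvMidD
    apply List.map_congr_left
    intro t ht
    rw [hrow]
  · intro c p hp
    simp only
    have hget : (PySem.Dict.mk tpl).get? p.1 = some p.2 := by
      apply PySem.Dict.get?_of_mem_items
      · show (p.1, p.2) ∈ tpl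
        simpa using hp
      · simpa [PySem.Dict.keys] using hnd
    rw [hget]
    exact pv_collapse p.2 p.1 _ c PySem.Dict.empty

lemma pv_ev_slot_bounds (schedule : List (List (String × List (String × List (List (String × String))))))
    (tpl : List (String × List String))
    (hpre : Pre_compute_team_ref_counts schedule tpl) :
    ∀ e ∈ pvEv schedule, 1 ≤ e.2.2 ∧ e.2.2 ≤ pvMax schedule := by
  intro e he
  obtain ⟨w, hw, he1⟩ := List.mem_flatMap.1 he
  obtain ⟨kv, hkv, he2⟩ := List.mem_flatMap.1 he1
  obtain ⟨g, hg, he3⟩ := List.mem_map.1 he2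
  have hslot : e.2.2 = (PySem.Int.ofStr? kv.1).getD 0 := by rw [← he3]; rfl
  constructor
  · rw [hslot]
    exact ((hpre.2 w hw).2.2.2 kv hkv).1
  · rw [hslot]
    have hmem : (PySem.Int.ofStr? kv.1).getD 0 ∈ pvAllSlots schedule := by
      apply List.mem_flatMap.2
      exact ⟨w, hw, List.mem_map.2 ⟨kv, hkv, rfl⟩⟩
    exact (PySem.List.le_foldl_max (pvAllSlots schedule) 1).2 _ hmem

theorem pv_main (schedule : List (List (String × List (String × List (List (String × String))))))
    (tpl : List (String × List String))
    (hpre : Pre_compute_team_ref_counts schedule tpl) :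
    compute_team_ref_counts schedule tpl = compute_team_ref_counts_alt schedule tpl := by
  have hnd := hpre.1
  unfold compute_team_ref_counts compute_team_ref_counts_alt
  simp only [pv_B_scan_eq]
  rw [pv_A_max_eq, pv_A_count_eq, pv_A_init_eq tpl (pvMax schedule) hnd,
    pv_count_fold_mat tpl (pvMax schedule) hnd (pvEv schedule)
      (pv_ev_slot_bounds schedule tpl hpre)]
  -- A side is now the materialized dict; flatten both sides to nested lists
  rw [pv_mat_items]
  -- B side: characterize the three comprehension folds
  have hfreshB := PySem.Dict.items_foldl_insert_fresh (l := tpl) (k := fun p => p.1)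
    (v := fun p : String × List String =>
      (List.foldl (fun (d : PySem.Dict String (List (Int × Int))) team =>
        d.insert team ((List.foldl (fun (dd : PySem.Dict Int Int) s =>
          dd.insert s ((pvB_tally (pvEv schedule)).getD (p.1, team, s) 0))
          PySem.Dict.empty (PySem.List.pyRange 1 (pvMax schedule + 1))).items)) PySem.Dict.empty p.2).items)
    (d := PySem.Dict.empty) (fun _ _ => rfl) (by simpa using hnd)
  rw [hfreshB]
  rw [show (PySem.Dict.empty : PySem.Dict String (List (String × List (Int × Int)))).items
    = [] from rfl, List.nil_append]
  rw [List.map_map]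
  apply List.map_congr_left
  intro p hp
  simp only [Function.comp_apply, Prod.mk.injEq, true_and]
  -- mid level
  have hmidset := pv_foldl_insert_set (ν := List (Int × Int)) p.2
    (fun team => (List.foldl (fun (dd : PySem.Dict Int Int) s =>
      dd.insert s ((pvB_tally (pvEv schedule)).getD (p.1, team, s) 0))
      PySem.Dict.empty (PySem.List.pyRange 1 (pvMax schedule + 1))).items)
  rw [hmidset]
  unfold pvMidD
  rw [show (PySem.Dict.mk ((PySem.Set.ofList p.2).map
    (fun t => (t, pvRowD (pvMax schedule) (fun s => (fun _ _ _ => (0:Int)) p.1 t s + pvCnt (pvEv schedule) p.1 t s))))).items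
    = (PySem.Set.ofList p.2).map (fun t => (t, pvRowD (pvMax schedule)
      (fun s => (fun _ _ _ => (0:Int)) p.1 t s + pvCnt (pvEv schedule) p.1 t s))) from rfl]
  rw [List.map_map]
  apply List.map_congr_left
  intro t ht
  simp only [Function.comp_apply, Prod.mk.injEq, true_and]
  -- row level
  have hrowB := PySem.Dict.items_foldl_insert_fresh (l := PySem.List.pyRange 1 (pvMax schedule + 1))
    (k := fun s : Int => s)
    (v := fun s : Int => (pvB_tally (pvEv schedule)).getD (p.1, t, s) 0)
    (d := PySem.Dict.empty) (fun _ _ => rfl)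
    (by simpa using PySem.List.nodup_pyRange_one 1 (pvMax schedule + 1))
  rw [hrowB]
  rw [show (PySem.Dict.empty : PySem.Dict Int Int).items = [] from rfl, List.nil_append]
  unfold pvRowD
  apply List.map_congr_left
  intro s hs
  simp only [Prod.mk.injEq, true_and]
  rw [pv_tally_getD]
  simp

-- ===== VERDICT (by name: the statement is the Claim_ definition above) =====
theorem compute_team_ref_counts_spec : Claim_equal_compute_team_ref_counts := by
  intro schedule teams_per_level _hdom hpre
  unfold Spec_compute_team_ref_counts
  exact pv_main schedule teams_per_level hpre
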